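-- pv_equiv track=rewrite | github.com/intj1/Math300 | IFFL Heat/Heat.py | modulation
-- ===== SOURCE A (Python) =====
-- def modulation(t, period , off, on): #period * on or period * off must be less than len(t)
--     modTemp = []
--     for i in range(period):
--         while len(t) > len(modTemp):
--             for j in range(off):
--                 modTemp.append(30)
--             for k in range(31, 37):
--                 modTemp.append(k)
--             for l in range(on):
--                 modTemp.append(37)
--     return modTemp
-- ===== SOURCE B (Python) =====
-- def modulation(t, period, off, on):
--     if period <= 0 or not t:
--         return []
--     block = [30] * off + list(range(31, 37)) + [37] * on
--     k = (len(t) + len(block) - 1) // len(block)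
--     return block * k
-- ===== Notes on version B (the rewrite author's own statement) =====
-- stated objective: simpler
-- what changed: Replaces the nested for/while growth loop with a closed-form repeat count: build the block once and return block * ceil(len(t)/len(block)), guarding period<=0 and empty t.
import Mathlib
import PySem

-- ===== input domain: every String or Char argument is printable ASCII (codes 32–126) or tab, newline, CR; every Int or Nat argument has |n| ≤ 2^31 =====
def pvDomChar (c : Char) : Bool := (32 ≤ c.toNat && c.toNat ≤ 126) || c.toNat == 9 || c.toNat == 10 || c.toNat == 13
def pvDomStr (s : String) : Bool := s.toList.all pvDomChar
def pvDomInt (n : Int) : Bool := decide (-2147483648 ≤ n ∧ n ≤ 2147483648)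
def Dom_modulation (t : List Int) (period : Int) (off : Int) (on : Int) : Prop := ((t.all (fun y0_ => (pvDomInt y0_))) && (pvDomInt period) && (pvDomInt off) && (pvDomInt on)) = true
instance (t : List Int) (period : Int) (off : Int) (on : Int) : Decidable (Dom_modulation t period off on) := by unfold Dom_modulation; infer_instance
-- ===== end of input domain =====

-- B replaces A's nested grow-until-long-enough loops by one closed-form repeat count (simpler).

-- ===== PORT A =====
-- the body of A's inner while loop: append 30 off times, then 31..36, then 37 on times
def modWhileBody (off on : Int) (acc : List Int) : List Int :=
  acc ++ List.replicate off.toNat 30 ++ PySem.List.pyRange 31 37 1 ++ List.replicate on.toNat 37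

theorem modWhileBody_len (off on : Int) (acc : List Int) :
    acc.length + 6 ≤ (modWhileBody off on acc).length := by
  have h6 : (PySem.List.pyRange 31 37 1).length = 6 := by decide
  simp [modWhileBody, h6]; omega

-- A's 'while len(t) > len(modTemp): …'
def modWhile (t : List Int) (off on : Int) (acc : List Int) : List Int :=
  if t.length > acc.length then
    modWhile t off on (modWhileBody off on acc)
  else acc
termination_by t.length - acc.length
decreasing_by
  have := modWhileBody_len off on acc
  omega

def modulation (t : List Int) (period : Int) (off : Int) (on : Int) : List Int :=
  (PySem.List.pyRange 0 period 1).foldl (fun modTemp _ => modWhile t off on modTemp) []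

-- ===== PORT B =====
-- k is computed in Nat; exact, since both operands of Python's // are nonnegative here
def modulation_alt (t : List Int) (period : Int) (off : Int) (on : Int) : List Int :=
  if period ≤ 0 ∨ t = [] then []
  else
    let block := List.replicate off.toNat 30 ++ [31, 32, 33, 34, 35, 36] ++ List.replicate on.toNat 37
    let k := (t.length + block.length - 1) / block.length
    (List.replicate k block).flatten

-- ===== PRECONDITION & SPEC =====
def Spec_modulation (t : List Int) (period : Int) (off : Int) (on : Int) (out : List Int) : Prop := out = modulation_alt t period off on
instance (t : List Int) (period : Int) (off : Int) (on : Int) (out : List Int) : Decidable (Spec_modulation t period off on out) := by unfold Spec_modulation; infer_instance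

-- ===== CLAIM (what is proved, stated in full; the proofs are below) =====
def Claim_equal_modulation : Prop := ∀ (t : List Int) (period : Int) (off : Int) (on : Int), Dom_modulation t period off on → Spec_modulation t period off on (modulation t period off on)

-- ===== LEMMAS AND PROOFS =====

theorem pyRange_31_37 : PySem.List.pyRange 31 37 1 = [31, 32, 33, 34, 35, 36] := by decide

theorem modWhileBody_decomp (off on : Int) (acc : List Int) :
    modWhileBody off on acc = acc ++ modWhileBody off on [] := by
  simp [modWhileBody]

theorem modWhileBody_nil_len (off on : Int) : 6 ≤ (modWhileBody off on []).length := by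
  have := modWhileBody_len off on []
  simpa using this

-- ceiling-division step: one block removed from the remaining demand
theorem cdiv_step (d B : Nat) (hB : 1 ≤ B) (hd : 1 ≤ d) :
    (d + B - 1) / B = (d - B + B - 1) / B + 1 := by
  have h1 : d + B - 1 = (d - 1) + B := by omega
  rw [h1, Nat.add_div_right _ hB]
  by_cases h : d ≤ B
  · have h0 : d - B = 0 := by omega
    have ha : (d - 1) / B = 0 := Nat.div_eq_of_lt (by omega)
    have hbb : (0 + B - 1) / B = 0 := Nat.div_eq_of_lt (by omega)
    rw [h0, ha, hbb]
  · have h2 : d - B + B - 1 = (d - B - 1) + B := by omega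
    rw [h2, Nat.add_div_right _ hB]
    have h3 : d - 1 = (d - B - 1) + B := by omega
    rw [h3, Nat.add_div_right _ hB]

-- the ceiling count covers the demand
theorem cdiv_ge (d B : Nat) (hB : 1 ≤ B) : d ≤ ((d + B - 1) / B) * B := by
  rcases Nat.eq_zero_or_pos d with h0 | hd
  · simp [h0]
  · obtain ⟨e, rfl⟩ : ∃ e, d = e + 1 := ⟨d - 1, by omega⟩
    have h1 : e + 1 + B - 1 = e + B := by omega
    rw [h1, Nat.add_div_right _ hB]
    have h2 := Nat.div_add_mod e B
    have h3 : e % B < B := Nat.mod_lt _ hB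
    have h4 : (e / B + 1) * B = B * (e / B) + B := by ring
    rw [h4]
    linarith

theorem length_flatten_replicate (n : Nat) (l : List Int) :
    (List.replicate n l).flatten.length = n * l.length := by
  induction n with
  | zero => simp
  | succ m ih => simp [List.replicate_succ, ih]; ring

theorem modWhile_eq (t : List Int) (off on : Int) (acc : List Int) :
    modWhile t off on acc =
      acc ++ (List.replicate ((t.length - acc.length + (modWhileBody off on []).length - 1)
                / (modWhileBody off on []).length) (modWhileBody off on [])).flatten := by
  have hB := modWhileBody_nil_len off on
  rw [modWhile]
  by_cases h : t.length > acc.length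
  · rw [if_pos h, modWhile_eq t off on (modWhileBody off on acc), modWhileBody_decomp]
    have hlen : (acc ++ modWhileBody off on []).length
        = acc.length + (modWhileBody off on []).length := by
      simp
    rw [hlen]
    have harg : t.length - (acc.length + (modWhileBody off on []).length)
        = t.length - acc.length - (modWhileBody off on []).length := by omega
    rw [harg]
    have hstep := cdiv_step (t.length - acc.length) (modWhileBody off on []).length
      (by omega) (by omega)
    rw [hstep, List.replicate_succ]
    simp
  · have h0 : t.length - acc.length = 0 := by omega
    have hz : (0 + (modWhileBody off on []).length - 1) / (modWhileBody off on []).length = 0 :=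
      Nat.div_eq_of_lt (by omega)
    rw [if_neg h, h0, hz]
    simp
termination_by t.length - acc.length
decreasing_by
  have := modWhileBody_len off on acc
  omega

theorem foldl_modWhile_fixed (t : List Int) (off on : Int) (R : List Int)
    (hR : t.length ≤ R.length) (l : List Int) :
    l.foldl (fun a _ => modWhile t off on a) R = R := by
  induction l with
  | nil => rfl
  | cons x xs ih =>
    simp only [List.foldl_cons]
    rw [modWhile, if_neg (by omega)]
    exact ih

-- ===== VERDICT (by name: the statement is the Claim_ definition above) =====
theorem modulation_spec : Claim_equal_modulation := by
  unfold Claim_equal_modulation Spec_modulation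
  intro t period off on _
  by_cases hp : period ≤ 0
  · rw [modulation, PySem.List.pyRange_one_eq_nil (by omega)]
    simp [modulation_alt, hp]
  · have hB := modWhileBody_nil_len off on
    rw [modulation, PySem.List.pyRange_one_cons (by omega)]
    simp only [List.foldl_cons]
    rw [modWhile_eq]
    simp only [List.length_nil, Nat.sub_zero, List.nil_append]
    rw [foldl_modWhile_fixed]
    · by_cases ht : t = []
      · subst ht
        have hz : (0 + (modWhileBody off on []).length - 1) / (modWhileBody off on []).length = 0 :=
          Nat.div_eq_of_lt (by omega)
        simp only [List.length_nil, hz]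
        simp [modulation_alt]
      · rw [modulation_alt, if_neg (fun hc => hc.elim hp ht)]
        have hb : modWhileBody off on []
            = List.replicate off.toNat 30 ++ [31, 32, 33, 34, 35, 36] ++ List.replicate on.toNat 37 := by
          simp [modWhileBody, pyRange_31_37]
        rw [hb]
    · rw [length_flatten_replicate]
      exact cdiv_ge t.length (modWhileBody off on []).length (by omega)
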